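-- pv_equiv track=rewrite | github.com/IsmVirusXD/Questoes_URI | 03_String/1024_Criptografia.py | terceira
-- ===== SOURCE A (Python) =====
-- from math import trunc
--
-- def terceira(texto: str):
--     new_texto = ''
--     comeco = trunc(len(texto)/2)
--     contador = 0
--     for caracter in texto:
--         if contador >= comeco: new_texto += chr(ord(str(caracter)) - 1)
--         else: new_texto += str(caracter)
--         contador += 1
--     return new_texto
-- ===== SOURCE B (Python) =====
-- def terceira(texto: str):
--     comeco = len(texto) // 2
--     return texto[:comeco] + ''.join(chr(ord(c) - 1) for c in texto[comeco:])
-- ===== Notes on version B (the rewrite author's own statement) =====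
-- stated objective: simpler
-- what changed: Replaces the counter-and-branch loop over every character (with string += accumulation) by a split at the midpoint: a verbatim prefix slice plus one transforming join over only the suffix.
import Mathlib
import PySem

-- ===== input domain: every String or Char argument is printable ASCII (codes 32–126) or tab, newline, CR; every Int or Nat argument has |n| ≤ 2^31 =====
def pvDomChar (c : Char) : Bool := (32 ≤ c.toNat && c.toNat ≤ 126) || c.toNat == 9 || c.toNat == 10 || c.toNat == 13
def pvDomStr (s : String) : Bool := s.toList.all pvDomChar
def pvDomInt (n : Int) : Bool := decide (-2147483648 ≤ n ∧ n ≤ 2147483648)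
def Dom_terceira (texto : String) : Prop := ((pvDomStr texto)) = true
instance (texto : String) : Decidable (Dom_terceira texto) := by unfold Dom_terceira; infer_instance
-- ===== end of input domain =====

-- B replaces A's per-character counter/branch loop by a midpoint split: verbatim prefix plus one shifting pass over the suffix (objective: simpler).

-- ===== PORT A =====
-- A walks the whole string with a counter, appending either the character
-- itself or the character shifted down by one, depending on the counter.
def terceira (texto : String) : String :=
  let comeco : Nat := texto.toList.length / 2   -- trunc(len/2), len ≥ 0
  String.mk ((texto.toList.foldl
    (fun (st : List Char × Nat) caracter =>
      (st.1 ++ [if st.2 ≥ comeco then Char.ofNat (caracter.toNat - 1) else caracter],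
       st.2 + 1))
    ([], 0)).1)

-- ===== PORT B =====
-- B: prefix kept as-is, suffix mapped through the shift.
def terceira_alt (texto : String) : String :=
  let comeco : Nat := texto.toList.length / 2
  String.mk (texto.toList.take comeco ++
    (texto.toList.drop comeco).map (fun c => Char.ofNat (c.toNat - 1)))

-- ===== PRECONDITION & SPEC =====
def Spec_terceira (texto : String) (out : String) : Prop := out = terceira_alt texto
instance (texto : String) (out : String) : Decidable (Spec_terceira texto out) := by unfold Spec_terceira; infer_instance

-- ===== CLAIM (what is proved, stated in full; the proofs are below) =====
def Claim_equal_terceira : Prop := ∀ (texto : String), Dom_terceira texto → Spec_terceira texto (terceira texto)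

-- ===== LEMMAS AND PROOFS =====

theorem terceira_fold_inv (m : Nat) (cs : List Char) :
    ∀ (acc : List Char) (c : Nat),
      (cs.foldl
        (fun (st : List Char × Nat) caracter =>
          (st.1 ++ [if st.2 ≥ m then Char.ofNat (caracter.toNat - 1) else caracter],
           st.2 + 1))
        (acc, c)).1
      = acc ++ (cs.take (m - c) ++ (cs.drop (m - c)).map (fun ch => Char.ofNat (ch.toNat - 1))) := by
  induction cs with
  | nil => intro acc c; simp
  | cons ch tl ih =>
    intro acc c
    by_cases h : c ≥ m
    · have hmc : m - c = 0 := by omega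
      have hmc1 : m - (c + 1) = 0 := by omega
      simp [List.foldl, h, ih, hmc, hmc1]
    · have hmc : m - c = (m - (c + 1)) + 1 := by omega
      simp only [List.foldl, if_neg h, ih]
      rw [hmc]
      simp

theorem terceira_spec' (texto : String) : terceira texto = terceira_alt texto := by
  show String.mk _ = String.mk _
  rw [terceira_fold_inv]
  simp

-- ===== VERDICT (by name: the statement is the Claim_ definition above) =====
theorem terceira_spec : Claim_equal_terceira := by
  intro texto _
  exact terceira_spec' texto
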